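-- pv_equiv track=rewrite | github.com/RamonRuizOlais/mri-p-optimization | Evolutivo/distance.py | distancia_individual
-- ===== SOURCE A (Python) =====
-- def distancia_individual(i, x_base, x_comp, vector_TR):
--     if x_comp[i] == 1:
--         return 0
--
--     n = len(vector_TR)
--     min_dist = float('inf')
--
--     for j in range(i - 1, -1, -1):
--         if x_comp[j] == 1:
--             min_dist = abs(vector_TR[i] - vector_TR[j])
--             break
--
--     for j in range(i + 1, n):
--         if x_comp[j] == 1:
--             dist = abs(vector_TR[i] - vector_TR[j])
--             min_dist = min(min_dist, dist)
--             break
--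
--     if min_dist == float('inf'):
--         return vector_TR[i]
--
--     return min_dist
-- ===== SOURCE B (Python) =====
-- def distancia_individual(i, x_base, x_comp, vector_TR):
--     if x_comp[i] == 1:
--         return 0
--     sel = [j for j in range(len(vector_TR)) if x_comp[j] == 1]
--     below = [j for j in sel if j < i]
--     above = [j for j in sel if j > i]
--     dists = []
--     if below:
--         dists.append(abs(vector_TR[i] - vector_TR[below[-1]]))
--     if above:
--         dists.append(abs(vector_TR[i] - vector_TR[above[0]]))
--     return min(dists) if dists else vector_TR[i]
-- ===== Notes on version B (the rewrite author's own statement) =====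
-- stated objective: alternative
-- what changed: A scans outward from i with two early-break loops; B collects all selected indices in one comprehension, picks the boundary neighbours (last below i, first above i) from that list, and takes min over the collected distances.
-- outside the precondition, e.g. on distancia_individual(-3, [], [1, 0, 0, 1], [10, 20, 30, 40]): A returns 20, B returns 10; on distancia_individual(0, [], [0, 1], [3, 4, 5]): A returns 1, B raises IndexError
import Mathlib
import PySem

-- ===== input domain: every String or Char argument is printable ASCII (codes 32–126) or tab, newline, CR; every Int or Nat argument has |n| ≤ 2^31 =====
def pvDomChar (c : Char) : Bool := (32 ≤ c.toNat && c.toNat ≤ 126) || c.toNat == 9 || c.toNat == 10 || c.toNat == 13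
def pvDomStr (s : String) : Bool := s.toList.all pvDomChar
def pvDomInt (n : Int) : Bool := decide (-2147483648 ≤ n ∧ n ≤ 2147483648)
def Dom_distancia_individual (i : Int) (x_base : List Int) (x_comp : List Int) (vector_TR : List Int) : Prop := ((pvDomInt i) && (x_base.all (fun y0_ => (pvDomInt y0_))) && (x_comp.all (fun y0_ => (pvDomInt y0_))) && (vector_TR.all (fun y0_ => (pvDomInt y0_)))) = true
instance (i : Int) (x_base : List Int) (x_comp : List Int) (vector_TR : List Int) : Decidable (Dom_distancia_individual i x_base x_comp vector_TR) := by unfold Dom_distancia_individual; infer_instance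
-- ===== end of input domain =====

-- B replaces A's two outward early-break scans with one comprehension of all selected
-- indices and a boundary pick (last below i / first above i); same cost, different decomposition.

-- ===== PORT A =====
-- A: guard x_comp[i]==1; scan j = i-1 .. 0 for the first selected index (break = find?);
-- scan j = i+1 .. n-1 for the first selected index; min of the found distances, else vector_TR[i].
def distancia_individual (i : Int) (x_base : List Int) (x_comp : List Int) (vector_TR : List Int) : Int :=
  if PySem.List.pyGetD x_comp i 0 = 1 then 0
  else
    let n : Int := vector_TR.length
    let vi : Int := PySem.List.pyGetD vector_TR i 0
    -- for j in range(i-1, -1, -1): if x_comp[j]==1: min_dist = abs(...); break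
    let md1 : Option Int :=
      ((PySem.List.pyRange (i - 1) (-1) (-1)).find?
        (fun j => PySem.List.pyGetD x_comp j 0 == 1)).map
        (fun j => |vi - PySem.List.pyGetD vector_TR j 0|)
    -- for j in range(i+1, n): if x_comp[j]==1: dist = abs(...); min_dist = min(...); break
    let md2 : Option Int :=
      ((PySem.List.pyRange (i + 1) n 1).find?
        (fun j => PySem.List.pyGetD x_comp j 0 == 1)).map
        (fun j => |vi - PySem.List.pyGetD vector_TR j 0|)
    -- min_dist == inf ↔ both loops found nothing
    match md1, md2 with
    | none, none => vi
    | some a, none => a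
    | none, some b => b
    | some a, some b => min a b

-- ===== PORT B =====
-- B: sel = all selected indices; below/above filters; dists list; min(dists) if dists else vector_TR[i].
def distancia_individual_alt (i : Int) (x_base : List Int) (x_comp : List Int) (vector_TR : List Int) : Int :=
  if PySem.List.pyGetD x_comp i 0 = 1 then 0
  else
    let sel : List Int :=
      (PySem.List.pyRange 0 vector_TR.length 1).filter
        (fun j => PySem.List.pyGetD x_comp j 0 == 1)
    let vi : Int := PySem.List.pyGetD vector_TR i 0
    let below := sel.filter (fun j => decide (j < i))
    let above := sel.filter (fun j => decide (i < j))
    let d1 : List Int :=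
      match below.getLast? with
      | some p => [|vi - PySem.List.pyGetD vector_TR p 0|]
      | none => []
    let d2 : List Int :=
      match above.head? with
      | some q => [|vi - PySem.List.pyGetD vector_TR q 0|]
      | none => []
    match d1 ++ d2 with
    | [] => vi
    | a :: t => t.foldl min a

-- ===== PRECONDITION & SPEC =====
-- Pre_ restricts to the natural per-index domain: 0 ≤ i < len(vector_TR) and
-- len(x_comp) ≥ len(vector_TR). Outside it A either raises IndexError (x_comp shorter
-- than vector_TR, or i out of range) or relies on Python's negative-index wraparound,
-- an accident of raw indexing this per-index helper is never called with.
def Pre_distancia_individual (i : Int) (x_base : List Int) (x_comp : List Int) (vector_TR : List Int) : Prop :=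
  0 ≤ i ∧ i < vector_TR.length ∧ vector_TR.length ≤ x_comp.length
instance (i : Int) (x_base : List Int) (x_comp : List Int) (vector_TR : List Int) : Decidable (Pre_distancia_individual i x_base x_comp vector_TR) := by unfold Pre_distancia_individual; infer_instance

def pvWitness_distancia_individual : Int × List Int × List Int × List Int :=
  (2, [], [0, 1, 0, 0, 1], [1, 5, 9, 20, 11])

def Spec_distancia_individual (i : Int) (x_base : List Int) (x_comp : List Int) (vector_TR : List Int) (out : Int) : Prop := out = distancia_individual_alt i x_base x_comp vector_TR
instance (i : Int) (x_base : List Int) (x_comp : List Int) (vector_TR : List Int) (out : Int) : Decidable (Spec_distancia_individual i x_base x_comp vector_TR out) := by unfold Spec_distancia_individual; infer_instance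

-- ===== CLAIM (what is proved, stated in full; the proofs are below) =====
def Claim_equal_distancia_individual : Prop := ∀ (i : Int) (x_base : List Int) (x_comp : List Int) (vector_TR : List Int), Dom_distancia_individual i x_base x_comp vector_TR → Pre_distancia_individual i x_base x_comp vector_TR → Spec_distancia_individual i x_base x_comp vector_TR (distancia_individual i x_base x_comp vector_TR)

-- ===== LEMMAS AND PROOFS =====

-- find? over a reversed list is the last match of the list.
theorem find?_reverse_eq_getLast?_filter (l : List Int) (p : Int → Bool) :
    l.reverse.find? p = (l.filter p).getLast? := by
  rw [← List.head?_filter, List.filter_reverse, List.head?_reverse]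

-- The part of [0, n) below i is [0, i).
theorem filter_lt_pyRange (i n : Int) (h0 : 0 ≤ i) (h1 : i ≤ n) :
    (PySem.List.pyRange 0 n 1).filter (fun j => decide (j < i)) = PySem.List.pyRange 0 i 1 := by
  rw [PySem.List.pyRange_one_append 0 i n h0 h1, List.filter_append]
  have e1 : (PySem.List.pyRange 0 i 1).filter (fun j => decide (j < i)) = PySem.List.pyRange 0 i 1 := by
    apply List.filter_eq_self.mpr
    intro a ha
    have := (PySem.List.mem_pyRange_one.mp ha).2
    simpa using this
  have e2 : (PySem.List.pyRange i n 1).filter (fun j => decide (j < i)) = [] := by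
    apply List.filter_eq_nil_iff.mpr
    intro a ha
    have := (PySem.List.mem_pyRange_one.mp ha).1
    simpa using this
  rw [e1, e2, List.append_nil]

-- The part of [0, n) above i is [i+1, n).
theorem filter_gt_pyRange (i n : Int) (h0 : 0 ≤ i) (h1 : i + 1 ≤ n) :
    (PySem.List.pyRange 0 n 1).filter (fun j => decide (i < j)) = PySem.List.pyRange (i + 1) n 1 := by
  rw [PySem.List.pyRange_one_append 0 (i + 1) n (by omega) h1, List.filter_append]
  have e1 : (PySem.List.pyRange 0 (i + 1) 1).filter (fun j => decide (i < j)) = [] := by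
    apply List.filter_eq_nil_iff.mpr
    intro a ha
    have := (PySem.List.mem_pyRange_one.mp ha).2
    simpa using (by omega : ¬ i < a)
  have e2 : (PySem.List.pyRange (i + 1) n 1).filter (fun j => decide (i < j)) = PySem.List.pyRange (i + 1) n 1 := by
    apply List.filter_eq_self.mpr
    intro a ha
    have := (PySem.List.mem_pyRange_one.mp ha).1
    simpa using (by omega : i < a)
  rw [e1, e2, List.nil_append]

-- ===== VERDICT (by name: the statement is the Claim_ definition above) =====
theorem distancia_individual_spec : Claim_equal_distancia_individual := by
  intro i x_base x_comp vector_TR _hdom hpre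
  obtain ⟨h0, h1, _h2⟩ := hpre
  unfold Spec_distancia_individual distancia_individual distancia_individual_alt
  by_cases hg : PySem.List.pyGetD x_comp i 0 = 1
  · simp [hg]
  · simp only [hg, if_false]
    set p : Int → Bool := fun j => PySem.List.pyGetD x_comp j 0 == 1 with hp
    set f : Int → Int := fun j => |PySem.List.pyGetD vector_TR i 0 - PySem.List.pyGetD vector_TR j 0| with hf
    have hbelow : ((PySem.List.pyRange 0 (vector_TR.length : Int) 1).filter p).filter
        (fun j => decide (j < i)) = (PySem.List.pyRange 0 i 1).filter p := by
      rw [List.filter_comm, filter_lt_pyRange i _ h0 (le_of_lt h1)]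
    have habove : ((PySem.List.pyRange 0 (vector_TR.length : Int) 1).filter p).filter
        (fun j => decide (i < j)) = (PySem.List.pyRange (i + 1) (vector_TR.length : Int) 1).filter p := by
      rw [List.filter_comm, filter_gt_pyRange i _ h0 (by omega)]
    have hmd1 : (PySem.List.pyRange (i - 1) (-1) (-1)).find? p
        = ((PySem.List.pyRange 0 i 1).filter p).getLast? := by
      have : PySem.List.pyRange (i - 1) (-1) (-1) = (PySem.List.pyRange 0 i 1).reverse := by
        rw [PySem.List.pyRange_neg_one_eq_reverse]
        norm_num
      rw [this, find?_reverse_eq_getLast?_filter]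
    have hmd2 : (PySem.List.pyRange (i + 1) (vector_TR.length : Int) 1).find? p
        = ((PySem.List.pyRange (i + 1) (vector_TR.length : Int) 1).filter p).head? := by
      rw [← List.head?_filter]
    rw [hmd1, hmd2, hbelow, habove]
    rcases hL : ((PySem.List.pyRange 0 i 1).filter p).getLast? with _ | a <;>
    rcases hH : ((PySem.List.pyRange (i + 1) (vector_TR.length : Int) 1).filter p).head? with _ | b <;>
    simp [List.foldl, hf]
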